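-- pv_equiv track=rewrite | github.com/Aurora0601/Python-Cypto-tools | ZUC Cipher up.py | zuchongzhi_encrypt
-- ===== SOURCE A (Python) =====
-- def zuchongzhi_encrypt(text, shift1, shift2):         #祖冲之密码加密
--     result = []
--     for i, char in enumerate(text):
--         if char.isalpha():  # 检查字符是否是字母
--             # 确定使用哪个移位值
--             shift = shift1 if i % 2 == 0 else shift2
--             # 确定字母是大写还是小写
--             is_upper = char.isupper()
--             # 找到字母在字母表中的位置（0-25）
--             base = ord('A') if is_upper else ord('a')
--             # 计算新字母的位置并转换为字符
--             new_char = chr((ord(char) - base + shift) % 26 + base)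
--             # 保持字母的大小写不变
--             if not is_upper:
--                 new_char = new_char.lower()
--             result.append(new_char)
--         else:
--             # 非字母字符保持不变
--             result.append(char)
--     return ''.join(result)
-- ===== SOURCE B (Python) =====
-- def zuchongzhi_encrypt(text, shift1, shift2):
--     lower = ''.join(chr(97 + i) for i in range(26))
--     upper = ''.join(chr(65 + i) for i in range(26))
--
--     def table(shift):
--         shifted = ''.join(chr((i + shift) % 26 + 97) for i in range(26)) \
--                 + ''.join(chr((i + shift) % 26 + 65) for i in range(26))
--         return str.maketrans(lower + upper, shifted)
--
--     even_view = text.translate(table(shift1))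
--     odd_view = text.translate(table(shift2))
--     return ''.join(even_view[i] if i % 2 == 0 else odd_view[i]
--                    for i in range(len(text)))
-- ===== Notes on version B (the rewrite author's own statement) =====
-- stated objective: faster
-- what changed: Replaces the per-character parity branch with modular arithmetic by two str.maketrans translation tables built once (one per shift), two bulk C-level translate passes over the whole text, and a parity selection join between the two translated views.
import Mathlib
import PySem

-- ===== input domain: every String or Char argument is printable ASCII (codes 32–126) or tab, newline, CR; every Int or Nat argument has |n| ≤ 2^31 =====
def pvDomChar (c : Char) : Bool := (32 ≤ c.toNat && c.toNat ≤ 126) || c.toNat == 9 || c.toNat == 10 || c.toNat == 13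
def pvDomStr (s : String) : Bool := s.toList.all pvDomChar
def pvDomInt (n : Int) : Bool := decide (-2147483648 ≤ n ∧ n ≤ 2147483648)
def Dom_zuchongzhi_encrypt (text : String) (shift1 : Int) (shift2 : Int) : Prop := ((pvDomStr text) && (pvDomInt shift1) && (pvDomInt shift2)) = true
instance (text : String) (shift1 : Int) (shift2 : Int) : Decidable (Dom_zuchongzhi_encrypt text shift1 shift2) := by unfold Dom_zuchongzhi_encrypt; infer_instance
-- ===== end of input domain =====

-- B replaces A's per-character parity branch and modular arithmetic by two translation
-- tables built once (one per shift), two bulk translate passes, and a parity selection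
-- join between the two translated views (objective: faster by a constant factor).

-- ===== PORT A =====
def zuchongzhi_encrypt (text : String) (shift1 : Int) (shift2 : Int) : String :=
  let result : List Char :=
    (PySem.List.enumerate text.toList).foldl (fun acc p =>
      let i := p.1
      let char := p.2
      if PySem.Chars.isalpha char then
        let shift := if PySem.Int.mod i 2 = 0 then shift1 else shift2
        let isUpper := PySem.Chars.isupper char
        let base : Int := if isUpper then ('A'.toNat : Int) else ('a'.toNat : Int)
        let newChar := Char.ofNat ((PySem.Int.mod ((char.toNat : Int) - base + shift) 26) + base).toNat
        let newChar := if !isUpper then PySem.Chars.lowerChar newChar else newChar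
        acc ++ [newChar]
      else
        acc ++ [char]) []
  String.mk result

-- ===== PORT B =====
-- helper: the translation table for one shift (Python's `table(shift)`: str.maketrans
-- from lower+upper to their shifted counterparts; maketrans on two equal-length
-- distinct-key strings is exactly the dict of the zipped pairs)
def pvTable (shift : Int) : PySem.Dict Char Char :=
  let lower := (PySem.List.pyRange 0 26 1).map (fun i => Char.ofNat (97 + i).toNat)
  let upper := (PySem.List.pyRange 0 26 1).map (fun i => Char.ofNat (65 + i).toNat)
  let shifted :=
    (PySem.List.pyRange 0 26 1).map (fun i => Char.ofNat ((PySem.Int.mod (i + shift) 26) + 97).toNat)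
    ++ (PySem.List.pyRange 0 26 1).map (fun i => Char.ofNat ((PySem.Int.mod (i + shift) 26) + 65).toNat)
  PySem.Dict.mk (List.zip (lower ++ upper) shifted)

def zuchongzhi_encrypt_alt (text : String) (shift1 : Int) (shift2 : Int) : String :=
  let t1 := pvTable shift1
  let t2 := pvTable shift2
  -- str.translate: each character is replaced by its table entry, untabled ones pass through
  let evenView := text.toList.map (fun c => PySem.Dict.getD t1 c c)
  let oddView := text.toList.map (fun c => PySem.Dict.getD t2 c c)
  String.mk ((PySem.List.pyRange 0 (text.toList.length : Int) 1).map (fun i =>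
    if PySem.Int.mod i 2 = 0 then PySem.List.pyGetD evenView i ' '
    else PySem.List.pyGetD oddView i ' '))

-- ===== PRECONDITION & SPEC =====
def Spec_zuchongzhi_encrypt (text : String) (shift1 : Int) (shift2 : Int) (out : String) : Prop := out = zuchongzhi_encrypt_alt text shift1 shift2
instance (text : String) (shift1 : Int) (shift2 : Int) (out : String) : Decidable (Spec_zuchongzhi_encrypt text shift1 shift2 out) := by unfold Spec_zuchongzhi_encrypt; infer_instance

-- ===== CLAIM (what is proved, stated in full; the proofs are below) =====
def Claim_equal_zuchongzhi_encrypt : Prop := ∀ (text : String) (shift1 : Int) (shift2 : Int), Dom_zuchongzhi_encrypt text shift1 shift2 → Spec_zuchongzhi_encrypt text shift1 shift2 (zuchongzhi_encrypt text shift1 shift2)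

-- ===== LEMMAS AND PROOFS =====

-- A's per-character transform with the selected shift, with the redundant `.lower()` removed
def pvClean (shift : Int) (c : Char) : Char :=
  if PySem.Chars.isalpha c then
    let base : Int := if PySem.Chars.isupper c then 65 else 97
    Char.ofNat ((PySem.Int.mod ((c.toNat : Int) - base + shift) 26) + base).toNat
  else c

lemma pvLower_id (m : Int) (h0 : 0 ≤ m) (h1 : m < 26) :
    PySem.Chars.lowerChar (Char.ofNat (m + 97).toNat) = Char.ofNat (m + 97).toNat := by
  interval_cases m <;> rfl

-- A's inline step equals pvClean (the lowerChar in the lowercase branch is the identity)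
lemma pvStepA_eq_clean (shift : Int) (c : Char) :
    (if PySem.Chars.isalpha c then
      let isUpper := PySem.Chars.isupper c
      let base : Int := if isUpper then ('A'.toNat : Int) else ('a'.toNat : Int)
      let newChar := Char.ofNat ((PySem.Int.mod ((c.toNat : Int) - base + shift) 26) + base).toNat
      if !isUpper then PySem.Chars.lowerChar newChar else newChar
     else c) = pvClean shift c := by
  unfold pvClean
  by_cases ha : PySem.Chars.isalpha c
  · simp only [ha, if_true]
    by_cases hu : PySem.Chars.isupper c
    · simp [hu]
    · simp only [hu, Bool.not_false, if_true, if_false, Bool.false_eq_true]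
      exact pvLower_id _ (PySem.Int.mod_nonneg _ (by norm_num)) (PySem.Int.mod_lt _ (by norm_num))
  · simp [ha]

-- table lookup = A's clean per-character transform, for every character in the domain
set_option maxRecDepth 20000 in
set_option maxHeartbeats 1000000 in
lemma pvLookup_eq (shift : Int) (c : Char) (hc : pvDomChar c = true) :
    PySem.Dict.getD (pvTable shift) c c = pvClean shift c := by
  have hb : c.toNat ≤ 126 := by
    simp only [pvDomChar, Bool.or_eq_true, Bool.and_eq_true, beq_iff_eq,
      decide_eq_true_eq] at hc
    omega
  have hcn : Char.ofNat c.toNat = c := Char.ofNat_toNat c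
  rw [← hcn]
  interval_cases h : c.toNat <;> rfl

-- the A-side fold produces the map of the step over enumerate
lemma pvFoldA (shift1 shift2 : Int) (l : List (Int × Char)) (acc : List Char) :
    l.foldl (fun acc p =>
      let i := p.1
      let char := p.2
      if PySem.Chars.isalpha char then
        let shift := if PySem.Int.mod i 2 = 0 then shift1 else shift2
        let isUpper := PySem.Chars.isupper char
        let base : Int := if isUpper then ('A'.toNat : Int) else ('a'.toNat : Int)
        let newChar := Char.ofNat ((PySem.Int.mod ((char.toNat : Int) - base + shift) 26) + base).toNat
        let newChar := if !isUpper then PySem.Chars.lowerChar newChar else newChar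
        acc ++ [newChar]
      else
        acc ++ [char]) acc
    = acc ++ l.map (fun p => pvClean (if PySem.Int.mod p.1 2 = 0 then shift1 else shift2) p.2) := by
  induction l generalizing acc with
  | nil => simp
  | cons p rest ih =>
    simp only [List.foldl_cons, List.map_cons, ih]
    by_cases ha : PySem.Chars.isalpha p.2
    · simp only [ha, if_true, List.append_assoc, List.singleton_append]
      rw [← pvStepA_eq_clean (if PySem.Int.mod p.1 2 = 0 then shift1 else shift2) p.2]
      simp [ha]
    · simp [ha, pvClean]

-- ===== VERDICT (by name: the statement is the Claim_ definition above) =====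
theorem zuchongzhi_encrypt_spec : Claim_equal_zuchongzhi_encrypt := by
  intro text shift1 shift2 hdom
  unfold Spec_zuchongzhi_encrypt zuchongzhi_encrypt zuchongzhi_encrypt_alt
  have hdoms : ∀ c ∈ text.toList, pvDomChar c = true := by
    simp only [Dom_zuchongzhi_encrypt, Bool.and_eq_true, pvDomStr, List.all_eq_true] at hdom
    exact fun c hcm => hdom.1.1 c hcm
  set l := text.toList with hl
  rw [pvFoldA]
  apply congrArg String.mk
  rw [List.nil_append]
  apply List.ext_getElem
  · simp [PySem.List.length_enumerate, PySem.List.pyRange_one]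
  · intro k h1 h2
    have hk : k < l.length := by
      simpa [PySem.List.length_enumerate] using h1
    simp only [List.getElem_map, PySem.List.getElem_enumerate l 0 k
      (by simpa [PySem.List.length_enumerate] using hk)]
    simp only [PySem.List.pyRange_one, List.getElem_map, List.getElem_range]
    simp only [zero_add]
    have hget1 : PySem.List.pyGetD (l.map (fun c => PySem.Dict.getD (pvTable shift1) c c)) (k : Int) ' '
        = PySem.Dict.getD (pvTable shift1) l[k] l[k] := by
      rw [PySem.List.pyGetD_eq_getElem _ ' ' (Int.natCast_nonneg k)
        (by simpa using (Int.ofNat_lt.mpr hk))]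
      simp
    have hget2 : PySem.List.pyGetD (l.map (fun c => PySem.Dict.getD (pvTable shift2) c c)) (k : Int) ' '
        = PySem.Dict.getD (pvTable shift2) l[k] l[k] := by
      rw [PySem.List.pyGetD_eq_getElem _ ' ' (Int.natCast_nonneg k)
        (by simpa using (Int.ofNat_lt.mpr hk))]
      simp
    have hdc : pvDomChar l[k] = true := hdoms _ (List.getElem_mem hk)
    by_cases hpar : PySem.Int.mod (k : Int) 2 = 0
    · rw [if_pos hpar, if_pos hpar, hget1, pvLookup_eq shift1 _ hdc]
    · rw [if_neg hpar, if_neg hpar, hget2, pvLookup_eq shift2 _ hdc]
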